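-- pv_equiv track=rewrite | github.com/lappis-unb/rasa-nlu-trainer | app/tools/stories_parser.py | get_stories_from_file
-- ===== SOURCE A (Python) =====
-- def get_stories_from_file(lines=None):
--     stories_dict = {}
--     for i in range(len(lines)):
--         if '*' in lines[i]:
--             stories_name = lines[i].split()[1]
--             i += 1
--             stories_examples = []
--             while i < len(lines) and '*' not in lines[i] and lines[i] != '\n':
--                 stories_examples.append(lines[i].strip('-').strip()[2:])
--                 i += 1
--             stories_dict[stories_name] = stories_examples
--     return stories_dict
-- ===== SOURCE B (Python) =====
-- def get_stories_from_file(lines=None):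
--     stories_dict = {}
--     name = None
--     collecting = False
--     examples = []
--     for line in lines:
--         if '*' in line:
--             if name is not None:
--                 stories_dict[name] = examples
--             name = line.split()[1]
--             examples = []
--             collecting = True
--         elif line == '\n':
--             collecting = False
--         elif collecting:
--             examples.append(line.strip('-').strip()[2:])
--     if name is not None:
--         stories_dict[name] = examples
--     return stories_dict
-- ===== Notes on version B (the rewrite author's own statement) =====
-- stated objective: simpler
-- what changed: Replaces the index-driven outer loop with a nested re-scanning while loop by a single flat pass over the lines maintaining a current story name, a collecting flag and a pending examples list (a state machine), removing all index arithmetic.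
import Mathlib
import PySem

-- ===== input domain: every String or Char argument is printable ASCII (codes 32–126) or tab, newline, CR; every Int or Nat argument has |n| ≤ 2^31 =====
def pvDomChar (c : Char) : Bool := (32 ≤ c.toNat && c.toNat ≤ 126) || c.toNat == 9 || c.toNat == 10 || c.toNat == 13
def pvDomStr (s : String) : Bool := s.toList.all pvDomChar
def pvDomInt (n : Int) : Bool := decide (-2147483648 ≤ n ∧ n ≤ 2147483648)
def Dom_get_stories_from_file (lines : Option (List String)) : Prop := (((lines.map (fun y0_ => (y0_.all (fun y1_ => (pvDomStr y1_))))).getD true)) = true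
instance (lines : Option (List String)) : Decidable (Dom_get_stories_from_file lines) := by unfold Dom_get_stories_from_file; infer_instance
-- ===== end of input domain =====

-- B replaces A's index-driven outer loop with a nested re-scanning while loop by one flat
-- state-machine pass over the lines (objective: simpler).

-- ===== PORT A =====
-- line.strip('-').strip()[2:]  (shared expression of both Pythons)
def pvProc (l : String) : String :=
  PySem.Str.slice (PySem.Str.strip (PySem.Str.stripChars l "-")) (some 2) none

-- A's inner while loop, carrying the accumulator stories_examples
def pvCollect (ls : List String) (i : Nat) (acc : List String) : List String :=
  if _h : i < ls.length ∧ PySem.Str.isIn "*" (PySem.List.pyGetD ls (i : Int) "") = false ∧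
         PySem.List.pyGetD ls (i : Int) "" ≠ "\n" then
    pvCollect ls (i + 1) (acc ++ [pvProc (PySem.List.pyGetD ls (i : Int) "")])
  else acc
termination_by ls.length - i
decreasing_by omega

def get_stories_from_file (lines : Option (List String)) : List (String × List String) :=
  match lines with
  | none => []   -- len(None) raises TypeError in Python; excluded by Pre_
  | some ls =>
    ((PySem.List.pyRange 0 (ls.length : Int) 1).foldl
      (fun d i =>
        let line := PySem.List.pyGetD ls i ""
        if PySem.Str.isIn "*" line then
          d.insert (PySem.List.pyGetD (PySem.Str.split₀ line) 1 "") (pvCollect ls (i.toNat + 1) [])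
        else d)
      PySem.Dict.empty).items

-- ===== PORT B =====
-- one step of B's state machine; state = (stories_dict, name, collecting, examples)
def pvStepB (s : PySem.Dict String (List String) × Option String × Bool × List String)
    (line : String) : PySem.Dict String (List String) × Option String × Bool × List String :=
  let (d, name, collecting, examples) := s
  if PySem.Str.isIn "*" line then
    let d' := match name with
      | none => d
      | some nm => d.insert nm examples
    (d', some (PySem.List.pyGetD (PySem.Str.split₀ line) 1 ""), true, [])
  else if line = "\n" then (d, name, false, examples)
  else if collecting then (d, name, collecting, examples ++ [pvProc line])
  else (d, name, collecting, examples)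

def get_stories_from_file_alt (lines : Option (List String)) : List (String × List String) :=
  match lines with
  | none => []
  | some ls =>
    let s := ls.foldl pvStepB (PySem.Dict.empty, none, false, [])
    (match s.2.1 with
     | none => s.1
     | some nm => s.1.insert nm s.2.2.2).items

-- ===== PRECONDITION & SPEC =====
-- Pre_ excludes exactly the inputs where Python A raises: lines=None (TypeError) and any
-- line containing '*' with fewer than two whitespace-separated tokens (IndexError).
def Pre_get_stories_from_file (lines : Option (List String)) : Prop :=
  lines.isSome = true ∧
  ∀ l ∈ lines.getD [], PySem.Str.isIn "*" l = true → 2 ≤ (PySem.Str.split₀ l).length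
instance (lines : Option (List String)) : Decidable (Pre_get_stories_from_file lines) := by
  unfold Pre_get_stories_from_file; infer_instance

def pvWitness_get_stories_from_file : Option (List String) :=
  some ["* greet\n", " - hi there\n", "\n", "* bye\n", " - see you\n"]

def Spec_get_stories_from_file (lines : Option (List String)) (out : List (String × List String)) : Prop := out = get_stories_from_file_alt lines
instance (lines : Option (List String)) (out : List (String × List String)) : Decidable (Spec_get_stories_from_file lines out) := by unfold Spec_get_stories_from_file; infer_instance

-- ===== CLAIM (what is proved, stated in full; the proofs are below) =====
def Claim_equal_get_stories_from_file : Prop := ∀ (lines : Option (List String)), Dom_get_stories_from_file lines → Pre_get_stories_from_file lines → Spec_get_stories_from_file lines (get_stories_from_file lines)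

-- ===== LEMMAS AND PROOFS =====

-- A's outer for-loop over range(len(lines)), as a recursion on the index
def pvOuterA (ls : List String) (i : Nat) (d : PySem.Dict String (List String)) :
    PySem.Dict String (List String) :=
  if h : i < ls.length then
    pvOuterA ls (i + 1)
      (let line := PySem.List.pyGetD ls (i : Int) ""
       if PySem.Str.isIn "*" line then
         d.insert (PySem.List.pyGetD (PySem.Str.split₀ line) 1 "") (pvCollect ls (i + 1) [])
       else d)
  else d
termination_by ls.length - i
decreasing_by omega

-- B's pending final flush
def pvPend (d : PySem.Dict String (List String)) (name : Option String) (ex : List String) :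
    PySem.Dict String (List String) :=
  match name with
  | none => d
  | some nm => d.insert nm ex

lemma pvOuterA_eq (ls : List String) :
    ∀ (k i : Nat) (d : PySem.Dict String (List String)), ls.length - i = k →
    (PySem.List.pyRange (i : Int) (ls.length : Int) 1).foldl
      (fun d j =>
        let line := PySem.List.pyGetD ls j ""
        if PySem.Str.isIn "*" line then
          d.insert (PySem.List.pyGetD (PySem.Str.split₀ line) 1 "") (pvCollect ls (j.toNat + 1) [])
        else d) d = pvOuterA ls i d := by
  intro k
  induction k with
  | zero =>
    intro i d hk
    rw [PySem.List.pyRange_one_eq_nil (by omega), pvOuterA]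
    simp only [List.foldl_nil]
    rw [dif_neg (by omega)]
  | succ k ih =>
    intro i d hk
    rw [PySem.List.pyRange_one_cons (by exact_mod_cast (by omega : i < ls.length)), List.foldl_cons]
    rw [pvOuterA, dif_pos (by omega : i < ls.length)]
    have : ((i : Int) + 1) = ((i + 1 : Nat) : Int) := by push_cast; ring
    rw [this, ih (i + 1) _ (by omega)]
    simp

lemma pvCollect_acc (ls : List String) :
    ∀ (k i : Nat), ls.length - i = k → ∀ (acc : List String),
    pvCollect ls i acc = acc ++ pvCollect ls i [] := by
  intro k
  induction k with
  | zero =>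
    intro i hk acc
    have h : ¬(i < ls.length ∧ PySem.Str.isIn "*" (PySem.List.pyGetD ls (i : Int) "") = false ∧
        PySem.List.pyGetD ls (i : Int) "" ≠ "\n") := fun hh => absurd hh.1 (by omega)
    conv_lhs => rw [pvCollect]
    conv_rhs => rw [pvCollect]
    rw [dif_neg h, dif_neg h]
    simp
  | succ k ih =>
    intro i hk acc
    by_cases h : i < ls.length ∧ PySem.Str.isIn "*" (PySem.List.pyGetD ls (i : Int) "") = false ∧
        PySem.List.pyGetD ls (i : Int) "" ≠ "\n"
    · conv_lhs => rw [pvCollect]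
      conv_rhs => rw [pvCollect]
      rw [dif_pos h, dif_pos h]
      conv_rhs => rw [ih (i + 1) (by omega)]
      rw [ih (i + 1) (by omega)]
      simp
    · conv_lhs => rw [pvCollect]
      conv_rhs => rw [pvCollect]
      rw [dif_neg h, dif_neg h]
      simp

lemma pvMain (ls : List String) :
    ∀ (k i : Nat), ls.length - i = k →
    ∀ (d : PySem.Dict String (List String)) (name : Option String) (P : List String) (coll : Bool),
    pvOuterA ls i (pvPend d name (P ++ (if coll then pvCollect ls i [] else []))) =
      (fun s => pvPend s.1 s.2.1 s.2.2.2) ((ls.drop i).foldl pvStepB (d, name, coll, P)) := by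
  intro k
  induction k with
  | zero =>
    intro i hk d name P coll
    rw [List.drop_eq_nil_of_le (by omega), pvOuterA, dif_neg (by omega)]
    rw [pvCollect, dif_neg (by omega)]
    simp
  | succ k ih =>
    intro i hk d name P coll
    have hlt : i < ls.length := by omega
    have hget : PySem.List.pyGetD ls (i : Int) "" = ls[i] := by
      simp [List.getD_eq_getElem?_getD, List.getElem?_eq_getElem hlt]
    rw [List.drop_eq_getElem_cons hlt, List.foldl_cons]
    rw [pvOuterA, dif_pos hlt]
    simp only [hget]
    by_cases hstar : PySem.Str.isIn "*" ls[i] = true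
    · -- '*' line: A inserts the full collection; B flushes the pending story and starts fresh
      have hstop : pvCollect ls i [] = [] := by
        conv_lhs => rw [pvCollect]
        rw [dif_neg]
        rintro ⟨-, hb, -⟩
        rw [hget, hstar] at hb
        simp at hb
      have hstep : pvStepB (d, name, coll, P) ls[i] =
          (pvPend d name P, some (PySem.List.pyGetD (PySem.Str.split₀ ls[i]) 1 ""), true, []) := by
        cases name <;> (simp only [pvStepB, pvPend]; rw [if_pos hstar])
      rw [if_pos hstar, hstep, hstop]
      simp only [ite_self, List.append_nil]
      have h2 := ih (i + 1) (by omega) (pvPend d name P)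
        (some (PySem.List.pyGetD (PySem.Str.split₀ ls[i]) 1 "")) [] true
      simp only [pvPend, if_pos, List.nil_append] at h2
      exact h2
    · rw [if_neg hstar]
      by_cases hnl : ls[i] = "\n"
      · -- blank line: A's dict unchanged; B stops collecting
        have hstop : pvCollect ls i [] = [] := by
          conv_lhs => rw [pvCollect]
          rw [dif_neg]
          rintro ⟨-, -, hc⟩
          rw [hget] at hc
          exact hc hnl
        have hstep : pvStepB (d, name, coll, P) ls[i] = (d, name, false, P) := by
          cases name <;> (simp only [pvStepB]; rw [if_neg hstar, if_pos hnl])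
        rw [hstep, hstop]
        simp only [ite_self, List.append_nil]
        have h2 := ih (i + 1) (by omega) d name P false
        simp only [if_neg (Bool.false_ne_true), List.append_nil] at h2
        exact h2
      · -- ordinary line
        cases coll with
        | false =>
          have hstep : pvStepB (d, name, false, P) ls[i] = (d, name, false, P) := by
            cases name <;> (simp only [pvStepB]; rw [if_neg hstar, if_neg hnl]; simp)
          rw [hstep]
          have h2 := ih (i + 1) (by omega) d name P false
          simp only [if_neg (Bool.false_ne_true), List.append_nil] at h2 ⊢
          exact h2
        | true =>
          have hcons : pvCollect ls i [] = pvProc ls[i] :: pvCollect ls (i + 1) [] := by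
            conv_lhs => rw [pvCollect]
            rw [dif_pos ⟨hlt, by rw [hget]; exact Bool.eq_false_iff.mpr hstar, by rw [hget]; exact hnl⟩]
            rw [hget, pvCollect_acc ls (ls.length - (i + 1)) (i + 1) rfl]
            simp
          have hstep : pvStepB (d, name, true, P) ls[i] = (d, name, true, P ++ [pvProc ls[i]]) := by
            cases name <;> (simp only [pvStepB]; rw [if_neg hstar, if_neg hnl]; simp)
          rw [hstep, hcons]
          simp only [if_pos]
          have hA : P ++ pvProc ls[i] :: pvCollect ls (i + 1) [] =
              (P ++ [pvProc ls[i]]) ++ pvCollect ls (i + 1) [] := by simp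
          rw [hA]
          have h2 := ih (i + 1) (by omega) d name (P ++ [pvProc ls[i]]) true
          simp only [if_pos] at h2
          exact h2

-- ===== VERDICT (by name: the statement is the Claim_ definition above) =====
theorem get_stories_from_file_spec : Claim_equal_get_stories_from_file := by
  intro lines _ _
  unfold Spec_get_stories_from_file
  cases lines with
  | none => rfl
  | some ls =>
    simp only [get_stories_from_file, get_stories_from_file_alt]
    have h0 : (0 : Int) = ((0 : Nat) : Int) := rfl
    rw [h0, pvOuterA_eq ls ls.length 0 PySem.Dict.empty (by omega)]
    have h2 := pvMain ls ls.length 0 (by omega) PySem.Dict.empty none [] false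
    simp only [List.drop_zero, pvPend] at h2
    rw [h2]
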